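-- pv_equiv track=rewrite | github.com/nodexone/testnet | osmosis/osmo.py | get_key_case_insensitive
-- ===== SOURCE A (Python) =====
-- def get_key_case_insensitive(dict, candidate_value):
--     if candidate_value is None:
--         return None
--     candidate = candidate_value.lower()
--     key = [k for k, v in dict.items() if v.lower() == candidate]
--     if len(key) == 1:
--         return key[0]
--     return None
-- ===== SOURCE B (Python) =====
-- def get_key_case_insensitive(dict, candidate_value):
--     if candidate_value is None:
--         return None
--     candidate = candidate_value.lower()
--     it = iter(dict.items())
--     for k, v in it:
--         if v.lower() == candidate:
--             # found a first match: the answer is k iff no second match exists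
--             for _k2, v2 in it:
--                 if v2.lower() == candidate:
--                     return None
--             return k
--     return None
-- ===== Notes on version B (the rewrite author's own statement) =====
-- stated objective: alternative
-- what changed: Instead of materialising the full list of matching keys and testing its length, B searches for the FIRST match and then scans only the remaining items for a SECOND match, returning early (None) as soon as one is found; it never builds a list and can stop mid-scan.
import Mathlib
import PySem

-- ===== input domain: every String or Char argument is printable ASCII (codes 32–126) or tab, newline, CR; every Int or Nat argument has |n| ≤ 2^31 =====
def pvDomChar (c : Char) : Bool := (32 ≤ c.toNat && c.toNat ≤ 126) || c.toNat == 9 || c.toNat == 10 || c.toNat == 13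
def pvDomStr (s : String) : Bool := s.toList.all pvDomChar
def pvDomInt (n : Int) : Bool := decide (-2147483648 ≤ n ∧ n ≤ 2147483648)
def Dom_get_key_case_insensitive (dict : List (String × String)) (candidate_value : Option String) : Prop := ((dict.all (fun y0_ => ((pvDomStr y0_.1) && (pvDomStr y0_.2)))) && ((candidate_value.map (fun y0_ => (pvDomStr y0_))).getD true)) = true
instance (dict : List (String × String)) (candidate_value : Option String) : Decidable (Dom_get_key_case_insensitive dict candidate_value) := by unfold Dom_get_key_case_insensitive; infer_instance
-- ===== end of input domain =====

-- B replaces A's build-all-matching-keys-then-check-length comprehension by a staged search: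
-- find the first match, then scan only the remaining items for a second match with an early
-- return; no intermediate list is built (objective: alternative).


-- ===== PORT A =====
def get_key_case_insensitive (dict : List (String × String)) (candidate_value : Option String) : Option String :=
  match candidate_value with
  | none => none
  | some cv =>
    let candidate := PySem.Str.lower cv
    -- key = [k for k, v in dict.items() if v.lower() == candidate]
    let key := dict.filterMap (fun kv => if PySem.Str.lower kv.2 == candidate then some kv.1 else none)
    if key.length = 1 then key.head? else none

-- ===== PORT B =====
-- inner loop of Source B: scan the remaining items for a second match (early return None)
def gkciSecondScan (rest : List (String × String)) (candidate : String) (k : String) : Option String :=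
  match rest with
  | [] => some k
  | kv :: tl => if PySem.Str.lower kv.2 == candidate then none else gkciSecondScan tl candidate k

-- outer loop of Source B: search for the first match, then hand the rest to the inner scan
def gkciFirstScan (items : List (String × String)) (candidate : String) : Option String :=
  match items with
  | [] => none
  | kv :: tl =>
    if PySem.Str.lower kv.2 == candidate then gkciSecondScan tl candidate kv.1
    else gkciFirstScan tl candidate

def get_key_case_insensitive_alt (dict : List (String × String)) (candidate_value : Option String) : Option String :=
  match candidate_value with
  | none => none
  | some cv => gkciFirstScan dict (PySem.Str.lower cv)

-- ===== PRECONDITION & SPEC =====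
def Spec_get_key_case_insensitive (dict : List (String × String)) (candidate_value : Option String) (out : Option String) : Prop := out = get_key_case_insensitive_alt dict candidate_value
instance (dict : List (String × String)) (candidate_value : Option String) (out : Option String) : Decidable (Spec_get_key_case_insensitive dict candidate_value out) := by unfold Spec_get_key_case_insensitive; infer_instance

-- ===== CLAIM (what is proved, stated in full; the proofs are below) =====
def Claim_equal_get_key_case_insensitive : Prop := ∀ (dict : List (String × String)) (candidate_value : Option String), Dom_get_key_case_insensitive dict candidate_value → Spec_get_key_case_insensitive dict candidate_value (get_key_case_insensitive dict candidate_value)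

-- ===== LEMMAS AND PROOFS =====

-- abbreviation used only in the proofs: A's list of matching keys
def gkciMatches (l : List (String × String)) (c : String) : List String :=
  l.filterMap (fun kv => if PySem.Str.lower kv.2 == c then some kv.1 else none)

theorem matches_cons (hd : String × String) (tl : List (String × String)) (c : String) :
    gkciMatches (hd :: tl) c
      = if PySem.Str.lower hd.2 == c then hd.1 :: gkciMatches tl c else gkciMatches tl c := by
  by_cases h : PySem.Str.lower hd.2 == c
  · rw [gkciMatches, List.filterMap_cons]
    rw [show (if (PySem.Str.lower hd.2 == c) = true then some hd.1 else none) = some hd.1 from if_pos h,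
      if_pos h]
    rfl
  · rw [gkciMatches, List.filterMap_cons]
    rw [show (if (PySem.Str.lower hd.2 == c) = true then some hd.1 else none) = none from if_neg h,
      if_neg h]
    rfl

theorem secondScan_eq (c k : String) (rest : List (String × String)) :
    gkciSecondScan rest c k = if gkciMatches rest c = [] then some k else none := by
  induction rest with
  | nil => rfl
  | cons hd tl ih =>
    rw [matches_cons]
    by_cases h : PySem.Str.lower hd.2 == c
    · simp only [gkciSecondScan, h, if_pos]
      simp
    · simp only [Bool.not_eq_true] at h
      simp only [gkciSecondScan, h, Bool.false_eq_true, if_false]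
      exact ih

theorem firstScan_eq (c : String) (l : List (String × String)) :
    gkciFirstScan l c = if (gkciMatches l c).length = 1 then (gkciMatches l c).head? else none := by
  induction l with
  | nil => rfl
  | cons hd tl ih =>
    rw [matches_cons]
    by_cases h : PySem.Str.lower hd.2 == c
    · simp only [gkciFirstScan, h, if_pos]
      rw [secondScan_eq]
      cases hM : gkciMatches tl c with
      | nil => simp
      | cons x xs => simp
    · simp only [Bool.not_eq_true] at h
      simp only [gkciFirstScan, h, Bool.false_eq_true, if_false]
      exact ih

-- ===== VERDICT (by name: the statement is the Claim_ definition above) =====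
theorem get_key_case_insensitive_spec : Claim_equal_get_key_case_insensitive := by
  intro dict candidate_value _
  unfold Spec_get_key_case_insensitive get_key_case_insensitive get_key_case_insensitive_alt
  cases candidate_value with
  | none => rfl
  | some cv =>
    simp only
    rw [firstScan_eq]
    rfl
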